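-- pv_equiv track=rewrite | github.com/jclements3/trefoil | scripts/validate_hymnal.py | abc_note_to_midi
-- ===== SOURCE A (Python) =====
-- NOTE_BASE = {"C": 0, "D": 2, "E": 4, "F": 5, "G": 7, "A": 9, "B": 11}
--
-- def abc_note_to_midi(note_str, key_sig):
--     """Parse a single ABC note token to MIDI number. Returns None if unparsable."""
--     s = note_str.strip()
--     if not s or s.startswith("z") or s.startswith("x"):
--         return None
--     acc = None
--     i = 0
--     while i < len(s) and s[i] in "^_=":
--         if s[i] == "^":
--             acc = (acc or 0) + 1
--         elif s[i] == "_":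
--             acc = (acc or 0) - 1
--         elif s[i] == "=":
--             acc = 0
--         i += 1
--     if i >= len(s):
--         return None
--     ch = s[i]
--     if ch.upper() not in NOTE_BASE:
--         return None
--     name = ch.upper()
--     octave = 5 if ch.islower() else 4
--     i += 1
--     while i < len(s):
--         if s[i] == "'":
--             octave += 1
--         elif s[i] == ",":
--             octave -= 1
--         else:
--             break
--         i += 1
--     if acc is None:
--         acc = key_sig.get(name, 0)
--     return NOTE_BASE[name] + acc + 12 * octave
-- ===== SOURCE B (Python) =====
-- NOTE_BASE = {"C": 0, "D": 2, "E": 4, "F": 5, "G": 7, "A": 9, "B": 11}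
--
-- def abc_note_to_midi(note_str, key_sig):
--     """Parse a single ABC note token to MIDI number. Returns None if unparsable."""
--     s = note_str.strip()
--     rest = s.lstrip("^_=")
--     if not rest or rest[0].upper() not in NOTE_BASE:
--         return None
--     accs = s[: len(s) - len(rest)]
--     letter, body = rest[0], rest[1:]
--     marks = body[: len(body) - len(body.lstrip("',"))]
--     name = letter.upper()
--     if accs:
--         tail = accs.rsplit("=", 1)[-1]
--         acc = tail.count("^") - tail.count("_")
--     else:
--         acc = key_sig.get(name, 0)
--     octave = (5 if letter.islower() else 4) + marks.count("'") - marks.count(",")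
--     return NOTE_BASE[name] + acc + 12 * octave
-- ===== Notes on version B (the rewrite author's own statement) =====
-- stated objective: alternative
-- what changed: A scans the token left-to-right with one mutable index and interleaved accidental/octave state; B splits the token into its three fields (accidental prefix via lstrip, letter, octave-mark run) and computes the result arithmetically from character counts (accidental = #^ - #_ after the last '=', octave offset = #' - #,), with no stateful scan.
import Mathlib
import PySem

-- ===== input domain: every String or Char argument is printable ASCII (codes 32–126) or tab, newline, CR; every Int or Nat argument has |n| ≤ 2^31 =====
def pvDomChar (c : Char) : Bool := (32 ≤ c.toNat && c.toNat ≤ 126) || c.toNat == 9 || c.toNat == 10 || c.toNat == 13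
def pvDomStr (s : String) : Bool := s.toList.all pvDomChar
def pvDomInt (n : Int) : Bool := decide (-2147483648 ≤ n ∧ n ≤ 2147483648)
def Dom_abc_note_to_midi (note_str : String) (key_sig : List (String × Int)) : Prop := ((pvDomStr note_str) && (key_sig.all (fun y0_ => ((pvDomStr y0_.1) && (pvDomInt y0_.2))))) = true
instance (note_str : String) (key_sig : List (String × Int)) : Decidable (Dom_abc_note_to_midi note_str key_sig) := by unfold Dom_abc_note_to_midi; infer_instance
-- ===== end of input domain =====

-- B replaces A's single mutable-index scan with field-splitting (lstrip prefix, letter, mark run)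
-- and computes accidental/octave arithmetically from character counts; objective: alternative, same cost.


-- ===== PORT A =====
-- NOTE_BASE
def pvNoteBase : PySem.Dict String Int :=
  PySem.Dict.mk [("C", 0), ("D", 2), ("E", 4), ("F", 5), ("G", 7), ("A", 9), ("B", 11)]

-- A's first while loop: consume '^'/'_'/'=' updating acc, return (acc, remaining chars)
def pvAccLoop : List Char → Option Int → Option Int × List Char
  | [], acc => (acc, [])
  | c :: rest, acc =>
    if c = '^' then pvAccLoop rest (some (acc.getD 0 + 1))
    else if c = '_' then pvAccLoop rest (some (acc.getD 0 - 1))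
    else if c = '=' then pvAccLoop rest (some 0)
    else (acc, c :: rest)

-- A's second while loop: consume '\''/',' adjusting octave, stop at anything else
def pvOctLoop : List Char → Int → Int
  | [], o => o
  | c :: rest, o =>
    if c = '\'' then pvOctLoop rest (o + 1)
    else if c = ',' then pvOctLoop rest (o - 1)
    else o

-- A's body after s = note_str.strip(); works on the char list of s
def pvACore (s : List Char) (key_sig : List (String × Int)) : Option Int :=
  match s with
  | [] => none
  | c0 :: _ =>
    if c0 = 'z' ∨ c0 = 'x' then none
    else
      match pvAccLoop s none with
      | (acc, rest) =>
        match rest with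
        | [] => none
        | ch :: rest2 =>
          let name := PySem.Str.upper (String.ofList [ch])     -- ch.upper()
          match PySem.Dict.get? pvNoteBase name with        -- 'not in NOTE_BASE' → None, else base
          | none => none
          | some base =>
            let octave := pvOctLoop rest2 (if PySem.Chars.islower ch then 5 else 4)
            let a : Int := match acc with
              | none => PySem.Dict.getD (PySem.Dict.mk key_sig) name 0   -- key_sig.get(name, 0)
              | some v => v
            some (base + a + 12 * octave)

def abc_note_to_midi (note_str : String) (key_sig : List (String × Int)) : Option Int :=
  pvACore (PySem.Str.strip note_str).toList key_sig

-- ===== PORT B =====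
def pvIsAccChar (c : Char) : Bool := c = '^' || c = '_' || c = '='
def pvIsMarkChar (c : Char) : Bool := c = '\'' || c = ','

-- accs.rsplit("=", 1)[-1]: the part after the last '='
def pvAfterLastEq (cs : List Char) : List Char := (cs.reverse.takeWhile (fun c => c ≠ '=')).reverse

-- B's body after s = note_str.strip(); works on the char list of s
def pvBCore (s : List Char) (key_sig : List (String × Int)) : Option Int :=
  let rest := s.dropWhile pvIsAccChar                      -- s.lstrip("^_=")
  match rest with
  | [] => none
  | letter :: body =>
    let name := PySem.Str.upper (String.ofList [letter])
    match PySem.Dict.get? pvNoteBase name with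
    | none => none
    | some base =>
      let accs := s.take (s.length - rest.length)          -- s[: len(s)-len(rest)]
      let marks := body.take (body.length - (body.dropWhile pvIsMarkChar).length)
      let acc : Int :=
        if accs.isEmpty then PySem.Dict.getD (PySem.Dict.mk key_sig) name 0
        else ((pvAfterLastEq accs).count '^' : Int) - ((pvAfterLastEq accs).count '_' : Int)
      let octave : Int := (if PySem.Chars.islower letter then 5 else 4)
        + ((marks.count '\'' : Int) - (marks.count ',' : Int))
      some (base + acc + 12 * octave)

def abc_note_to_midi_alt (note_str : String) (key_sig : List (String × Int)) : Option Int :=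
  pvBCore (PySem.Str.strip note_str).toList key_sig

-- ===== PRECONDITION & SPEC =====
def Spec_abc_note_to_midi (note_str : String) (key_sig : List (String × Int)) (out : Option Int) : Prop := out = abc_note_to_midi_alt note_str key_sig
instance (note_str : String) (key_sig : List (String × Int)) (out : Option Int) : Decidable (Spec_abc_note_to_midi note_str key_sig out) := by unfold Spec_abc_note_to_midi; infer_instance

-- ===== CLAIM (what is proved, stated in full; the proofs are below) =====
def Claim_equal_abc_note_to_midi : Prop := ∀ (note_str : String) (key_sig : List (String × Int)), Dom_abc_note_to_midi note_str key_sig → Spec_abc_note_to_midi note_str key_sig (abc_note_to_midi note_str key_sig)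

-- ===== LEMMAS AND PROOFS =====

-- the pure fold A's accidental loop performs on the accidental prefix
def pvFoldAcc : List Char → Option Int → Option Int
  | [], a => a
  | c :: t, a =>
    pvFoldAcc t (if c = '^' then some (a.getD 0 + 1)
                 else if c = '_' then some (a.getD 0 - 1)
                 else some 0)

theorem pvAccLoop_eq (l : List Char) (acc : Option Int) :
    pvAccLoop l acc = (pvFoldAcc (l.takeWhile pvIsAccChar) acc, l.dropWhile pvIsAccChar) := by
  induction l generalizing acc with
  | nil => rfl
  | cons c t ih =>
    by_cases h1 : c = '^'
    · subst h1; simp [pvAccLoop, pvIsAccChar, pvFoldAcc, ih]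
    · by_cases h2 : c = '_'
      · subst h2; simp [pvAccLoop, pvIsAccChar, pvFoldAcc, ih]
      · by_cases h3 : c = '='
        · subst h3; simp [pvAccLoop, pvIsAccChar, pvFoldAcc, ih]
        · simp [pvAccLoop, pvIsAccChar, pvFoldAcc, h1, h2, h3]

theorem pvAfterLastEq_of_not_mem (t : List Char) (h : '=' ∉ t) : pvAfterLastEq t = t := by
  unfold pvAfterLastEq
  rw [List.takeWhile_eq_self_iff.mpr, List.reverse_reverse]
  intro x hx
  rw [List.mem_reverse] at hx
  simp
  rintro rfl
  exact h hx

theorem pvAfterLastEq_cons (c : Char) (t : List Char) :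
    pvAfterLastEq (c :: t) =
      if '=' ∈ t then pvAfterLastEq t else if c = '=' then t else c :: t := by
  by_cases hm : '=' ∈ t
  · rw [if_pos hm]
    unfold pvAfterLastEq
    rw [List.reverse_cons, List.takeWhile_append]
    split_ifs with hlen
    · exfalso
      have heq := List.IsPrefix.eq_of_length (List.takeWhile_prefix (l := t.reverse) _) hlen
      rw [List.mem_reverse.symm, ← heq] at hm
      have := List.mem_takeWhile_imp hm
      simp at this
    · rfl
  · rw [if_neg hm]
    have heq := congrArg List.reverse (pvAfterLastEq_of_not_mem t hm)
    unfold pvAfterLastEq at heq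
    rw [List.reverse_reverse] at heq
    unfold pvAfterLastEq
    rw [List.reverse_cons, List.takeWhile_append, heq]
    rw [if_pos rfl]
    by_cases hc : c = '='
    · subst hc
      simp [List.takeWhile]
    · simp [hc, List.takeWhile]

theorem pvFoldAcc_some (t : List Char) (hall : ∀ x ∈ t, pvIsAccChar x = true) (a : Int) :
    pvFoldAcc t (some a) =
      some ((if '=' ∈ t then 0 else a)
        + (((pvAfterLastEq t).count '^' : Int) - ((pvAfterLastEq t).count '_' : Int))) := by
  induction t generalizing a with
  | nil => simp [pvFoldAcc, pvAfterLastEq]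
  | cons c t ih =>
    replace ih := ih (fun x hx => hall x (List.mem_cons_of_mem c hx))
    rw [pvAfterLastEq_cons]
    by_cases h1 : c = '^'
    · subst h1
      have hstep : pvFoldAcc ('^' :: t) (some a) = pvFoldAcc t (some (a + 1)) := by
        simp [pvFoldAcc]
      rw [hstep, ih]
      by_cases h : '=' ∈ t
      · simp [h, List.mem_cons]
      · simp [h, List.mem_cons, pvAfterLastEq_of_not_mem t h]
        ring
    · by_cases h2 : c = '_'
      · subst h2
        have hstep : pvFoldAcc ('_' :: t) (some a) = pvFoldAcc t (some (a - 1)) := by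
          simp [pvFoldAcc]
        rw [hstep, ih]
        by_cases h : '=' ∈ t
        · simp [h, List.mem_cons]
        · simp [h, List.mem_cons, pvAfterLastEq_of_not_mem t h]
          ring
      · by_cases h3 : c = '='
        · subst h3
          have hstep : pvFoldAcc ('=' :: t) (some a) = pvFoldAcc t (some 0) := by
            simp [pvFoldAcc]
          rw [hstep, ih]
          by_cases h : '=' ∈ t
          · simp [h, List.mem_cons]
          · simp [h, List.mem_cons, pvAfterLastEq_of_not_mem t h]
        · -- the head is in the accidental prefix, so it is one of '^' '_' '='
          exact absurd (hall c List.mem_cons_self) (by simp [pvIsAccChar, h1, h2, h3])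

theorem pvFoldAcc_none (t : List Char) (h : t ≠ []) :
    pvFoldAcc t none = pvFoldAcc t (some 0) := by
  cases t with
  | nil => exact absurd rfl h
  | cons c t => simp [pvFoldAcc]

theorem pvOctLoop_eq (l : List Char) (o : Int) :
    pvOctLoop l o = o + (((l.takeWhile pvIsMarkChar).count '\'' : Int)
      - ((l.takeWhile pvIsMarkChar).count ',' : Int)) := by
  induction l generalizing o with
  | nil => simp [pvOctLoop]
  | cons c t ih =>
    by_cases h1 : c = '\''
    · subst h1
      simp [pvOctLoop, pvIsMarkChar, ih]
      push_cast; ring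
    · by_cases h2 : c = ','
      · subst h2
        simp [pvOctLoop, pvIsMarkChar, ih]
        push_cast; ring
      · simp [pvOctLoop, pvIsMarkChar, h1, h2]

theorem pvTake_sub_dropWhile (p : Char → Bool) (l : List Char) :
    l.take (l.length - (l.dropWhile p).length) = l.takeWhile p := by
  have hlen : (l.takeWhile p).length + (l.dropWhile p).length = l.length := by
    rw [← List.length_append, List.takeWhile_append_dropWhile]
  have h1 : l.length - (l.dropWhile p).length = (l.takeWhile p).length := by omega
  rw [h1, ← List.prefix_iff_eq_take.mp (List.takeWhile_prefix p)]

theorem pvCore_eq (s : List Char) (key_sig : List (String × Int)) :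
    pvACore s key_sig = pvBCore s key_sig := by
  cases s with
  | nil => rfl
  | cons c0 t =>
    by_cases hzx : c0 = 'z' ∨ c0 = 'x'
    · have hA : pvACore (c0 :: t) key_sig = none := by
        simp [pvACore, hzx]
      have hdw : (c0 :: t).dropWhile pvIsAccChar = c0 :: t := by
        rcases hzx with rfl | rfl <;> simp [pvIsAccChar]
      have hB : pvBCore (c0 :: t) key_sig = none := by
        rcases hzx with rfl | rfl <;> simp [pvBCore, hdw] <;> rfl
      rw [hA, hB]
    · rw [pvACore]
      simp only [hzx, if_false]
      rw [pvAccLoop_eq]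
      rw [pvBCore]
      cases hdw : (c0 :: t).dropWhile pvIsAccChar with
      | nil => simp
      | cons ch rest2 =>
        simp only
        cases hg : PySem.Dict.get? pvNoteBase (PySem.Str.upper (String.ofList [ch])) with
        | none => simp
        | some base =>
          simp only
          rw [pvTake_sub_dropWhile, pvOctLoop_eq]
          rw [← hdw, pvTake_sub_dropWhile]
          by_cases hacc : (c0 :: t).takeWhile pvIsAccChar = []
          · rw [hacc]
            simp only [pvFoldAcc, List.isEmpty_nil, if_true]
          · rw [pvFoldAcc_none _ hacc,
               pvFoldAcc_some _ (fun x hx => List.mem_takeWhile_imp hx)]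
            rw [if_neg (fun hE => hacc (List.isEmpty_iff.mp hE))]
            congr 1
            by_cases h : '=' ∈ (c0 :: t).takeWhile pvIsAccChar
            · simp only [h, if_true]
              ring
            · simp only [h, if_false]
              ring

-- ===== VERDICT (by name: the statement is the Claim_ definition above) =====
theorem abc_note_to_midi_spec : Claim_equal_abc_note_to_midi := by
  intro note_str key_sig _
  unfold Spec_abc_note_to_midi abc_note_to_midi abc_note_to_midi_alt
  exact pvCore_eq _ _
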